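-- pv_equiv track=rewrite | github.com/MWANGAZA-LAB/twiga-scan | backend/parsing/bolt11_parser.py | _is_valid_bolt11
-- ===== SOURCE A (Python) =====
-- def _is_valid_bolt11(invoice: str) -> bool:
--     """Basic BOLT11 format validation"""
--     # Check prefix
--     valid_prefixes = ["lnbc", "lntb", "lnbcrt"]
--     if not any(invoice.startswith(prefix) for prefix in valid_prefixes):
--         return False
--
--     # Check basic format (should be bech32-like)
--     if len(invoice) < 100:  # BOLT11 invoices are typically long
--         return False
--
--     # Check for valid characters (bech32 alphabet)
--     valid_chars = set("abcdefghijklmnopqrstuvwxyz0123456789")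
--     invoice_lower = invoice.lower()
--     if not all(c in valid_chars for c in invoice_lower[4:]):  # Skip prefix
--         return False
--
--     return True
-- ===== SOURCE B (Python) =====
-- def _is_valid_bolt11(invoice: str) -> bool:
--     return len(invoice) >= 100 and invoice[:4] in ("lnbc", "lntb") and invoice[4:].isalnum()
-- ===== Notes on version B (the rewrite author's own statement) =====
-- stated objective: simpler
-- what changed: Replaced A's three sequential guards (a startswith loop over three prefixes, a length check, and a per-character scan of the lowered tail against a hand-built bech32 charset set) with one boolean expression: a length bound, the 4-char slice compared against the two distinct 4-char prefixes (the redundant regtest prefix dropped, being an extension of the mainnet one), and str.isalnum on the raw tail replacing the lower()+set-membership scan.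
import Mathlib
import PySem

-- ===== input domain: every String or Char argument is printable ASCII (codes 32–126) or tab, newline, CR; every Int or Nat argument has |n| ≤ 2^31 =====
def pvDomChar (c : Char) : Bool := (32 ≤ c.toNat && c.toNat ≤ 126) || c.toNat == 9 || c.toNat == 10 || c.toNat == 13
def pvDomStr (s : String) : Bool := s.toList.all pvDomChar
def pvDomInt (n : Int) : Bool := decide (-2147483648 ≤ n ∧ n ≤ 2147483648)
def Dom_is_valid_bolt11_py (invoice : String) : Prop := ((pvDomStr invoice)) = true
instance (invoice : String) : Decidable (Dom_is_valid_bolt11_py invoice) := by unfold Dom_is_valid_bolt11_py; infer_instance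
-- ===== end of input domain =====

-- B replaces A's three imperative guards (prefix loop, length check, lowered-charset scan) by a
-- single boolean expression: length bound, the 4-char slice compared against {"lnbc","lntb"}
-- (the redundant "lnbcrt" dropped), and str.isalnum on the tail (objective: simpler).

-- ===== PORT A =====
def is_valid_bolt11_py (invoice : String) : Bool :=
  let valid_prefixes : List String := ["lnbc", "lntb", "lnbcrt"]
  if !(valid_prefixes.any (fun p => PySem.Str.startswith invoice p)) then false
  else if PySem.Str.len invoice < 100 then false
  else
    let valid_chars : PySem.Set Char :=
      PySem.Set.ofList "abcdefghijklmnopqrstuvwxyz0123456789".toList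
    let invoice_lower := PySem.Str.lower invoice
    if !((PySem.Str.slice invoice_lower (some 4) none).toList.all
          (fun c => valid_chars.contains c)) then false
    else true

-- ===== PORT B =====
def is_valid_bolt11_py_alt (invoice : String) : Bool :=
  decide (100 ≤ PySem.Str.len invoice) &&
  [("lnbc" : String), "lntb"].contains (PySem.Str.slice invoice none (some 4)) &&
  PySem.Str.strIsalnum (PySem.Str.slice invoice (some 4) none)

-- ===== PRECONDITION & SPEC =====
def Spec_is_valid_bolt11_py (invoice : String) (out : Bool) : Prop := out = is_valid_bolt11_py_alt invoice
instance (invoice : String) (out : Bool) : Decidable (Spec_is_valid_bolt11_py invoice out) := by unfold Spec_is_valid_bolt11_py; infer_instance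

-- ===== CLAIM (what is proved, stated in full; the proofs are below) =====
def Claim_equal_is_valid_bolt11_py : Prop := ∀ (invoice : String), Dom_is_valid_bolt11_py invoice → Spec_is_valid_bolt11_py invoice (is_valid_bolt11_py invoice)

-- ===== LEMMAS AND PROOFS =====

-- per-character bridge: on the ASCII domain, "lowercased char lies in the bech32 charset"
-- coincides with Python's isalnum
lemma char_bridge (c : Char) (h : pvDomChar c = true) :
    (PySem.Set.ofList "abcdefghijklmnopqrstuvwxyz0123456789".toList).contains
      (PySem.Chars.lowerChar c) = PySem.Chars.isalnum c := by
  have key : ∀ n : Fin 128,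
      (PySem.Set.ofList "abcdefghijklmnopqrstuvwxyz0123456789".toList).contains
        (PySem.Chars.lowerChar (Char.ofNat n.val)) = PySem.Chars.isalnum (Char.ofNat n.val) := by
    set_option maxRecDepth 100000 in decide
  have hb : c.toNat < 128 := by
    simp only [pvDomChar, Bool.or_eq_true, Bool.and_eq_true, decide_eq_true_eq, beq_iff_eq] at h
    omega
  simpa [Char.ofNat_toNat] using key ⟨c.toNat, hb⟩

lemma ofList_eq_iff (xs : List Char) (s : String) : (String.ofList xs = s) ↔ xs = s.toList := by
  constructor
  · intro h; simpa using congrArg String.toList h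
  · intro h; subst h; simp [String.ofList_toList]

-- ===== VERDICT (by name: the statement is the Claim_ definition above) =====
theorem is_valid_bolt11_py_spec : Claim_equal_is_valid_bolt11_py := by
  intro invoice hdom
  unfold Spec_is_valid_bolt11_py
  have hdom0 : invoice.toList.all pvDomChar = true := hdom
  simp only [is_valid_bolt11_py, is_valid_bolt11_py_alt, PySem.Str.startswith,
    PySem.Chars.startswith, PySem.Str.len, PySem.Str.lower, PySem.Str.strIsalnum,
    PySem.Chars.strIsalnum, PySem.Str.slice, PySem.Chars.slice_eq_listSlice, List.any_cons,
    List.any_nil, List.contains_cons, List.contains_nil, String.toList_ofList, Bool.or_false]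
  have hsl1' : PySem.List.slice (PySem.Chars.lower invoice.toList) (some 4) none
      = (PySem.Chars.lower invoice.toList).drop 4 := by simp [pysem]
  have hsl1 : PySem.List.slice invoice.toList (some 4) none = invoice.toList.drop 4 := by
    simp [pysem]
  have hsl2 : PySem.List.slice invoice.toList none (some 4) = invoice.toList.take 4 := by
    simp [pysem]
  rw [hsl1, hsl1', hsl2]
  clear hsl1 hsl1' hsl2 hdom
  obtain ⟨l, hl⟩ : ∃ l, invoice.toList = l := ⟨_, rfl⟩
  simp only [hl] at hdom0 ⊢
  clear hl
  have hdom' : ∀ c ∈ l, pvDomChar c = true := by simpa [List.all_eq_true] using hdom0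
  have hpfx : ∀ p : String, (p.toList.isPrefixOf l = true) ↔ p.toList <+: l := by
    intro p; exact List.isPrefixOf_iff_prefix
  have htake : ∀ p : String, p.toList.length = 4 →
      ((p.toList.isPrefixOf l = true) ↔ l.take 4 = p.toList) := by
    intro p hp
    rw [hpfx, List.prefix_iff_eq_take, hp]
    exact ⟨fun h => h.symm, fun h => h.symm⟩
  by_cases hlen : (100 : Int) ≤ (l.length : Int)
  · have hlen' : 100 ≤ l.length := by exact_mod_cast hlen
    have hne : ¬ ((l.length : Int) < 100) := by omega
    have hrt : ("lnbcrt".toList.isPrefixOf l = true) → ("lnbc".toList.isPrefixOf l = true) := by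
      intro h
      rw [hpfx] at *
      exact List.IsPrefix.trans (by decide) h
    have htail : ((PySem.Chars.lower l).drop 4).all
        (fun c => (PySem.Set.ofList "abcdefghijklmnopqrstuvwxyz0123456789".toList).contains c)
        = (l.drop 4).all PySem.Chars.isalnum := by
      have hmd : (PySem.Chars.lower l).drop 4 = (l.drop 4).map PySem.Chars.lowerChar := by
        simp [PySem.Chars.lower, List.map_drop]
      rw [hmd]
      apply Bool.eq_iff_iff.mpr
      simp only [List.all_eq_true, List.forall_mem_map]
      refine ⟨fun h c hc => ?_, fun h c hc => ?_⟩
      · rw [← char_bridge c (hdom' c (List.mem_of_mem_drop hc))]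
        exact h c hc
      · rw [char_bridge c (hdom' c (List.mem_of_mem_drop hc))]
        exact h c hc
    have hemp : (l.drop 4).isEmpty = false := by
      have hld : (l.drop 4).length = l.length - 4 := List.length_drop ..
      rw [List.isEmpty_eq_false_iff, ← List.length_pos_iff]
      omega
    by_cases hbc : l.take 4 = "lnbc".toList
    · have h1 : "lnbc".toList.isPrefixOf l = true := (htake "lnbc" (by decide)).mpr hbc
      rw [htail, h1]
      simp [hne, hlen, hemp, hbc]
      rw [Bool.eq_iff_iff]
      simp
    · by_cases htb : l.take 4 = "lntb".toList
      · have h2 : "lntb".toList.isPrefixOf l = true := (htake "lntb" (by decide)).mpr htb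
        rw [htail, h2]
        simp [hne, hlen, hemp, htb]
        rw [Bool.eq_iff_iff]
        simp
      · have h1 : "lnbc".toList.isPrefixOf l = false := by
          rw [Bool.eq_false_iff]
          intro h; exact hbc ((htake "lnbc" (by decide)).mp h)
        have h2 : "lntb".toList.isPrefixOf l = false := by
          rw [Bool.eq_false_iff]
          intro h; exact htb ((htake "lntb" (by decide)).mp h)
        have h3 : "lnbcrt".toList.isPrefixOf l = false := by
          rw [Bool.eq_false_iff]
          intro h
          exact hbc ((htake "lnbc" (by decide)).mp (hrt h))
        rw [h1, h2, h3]
        have hbc' : List.take 4 l ≠ ['l','n','b','c'] := by simpa using hbc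
        have htb' : List.take 4 l ≠ ['l','n','t','b'] := by simpa using htb
        simp [beq_iff_eq, ofList_eq_iff, hbc', htb']
  · have hlt : ((l.length : Int) < 100) := by omega
    simp [hlt]
    intro h
    exact absurd h (by omega)
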